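-- pv_equiv track=rewrite | github.com/rohitsinghlab/SAME | src/helpers.py | order_vertices_for_positive_area
-- ===== SOURCE A (Python) =====
-- from itertools import permutations
--
-- def order_vertices_for_positive_area(points):
--     # Extract the points and their names
--     point_names = list(points.keys())
--     point_values = list(points.values())
--
--     # Calculate the signed area
--     def signed_area(p1, p2, p3):
--         return (p1[0] * (p2[1] - p3[1]) +
--                 p2[0] * (p3[1] - p1[1]) +
--                 p3[0] * (p1[1] - p2[1]))
--
--     # Try all permutations of the points
--     for perm in permutations(zip(point_names, point_values)):
--         _, (p1, p2, p3) = zip(*perm)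
--         area = signed_area(p1, p2, p3)
--         if area > 0:
--             return [name for name, _ in perm]
--
--     # If no positive area is found, return an empty list (should not happen with valid triangles)
--     return []
-- ===== SOURCE B (Python) =====
-- def order_vertices_for_positive_area(points):
--     # Single sign test instead of enumerating all 6 permutations:
--     # a transposition of the last two vertices flips the sign of the area.
--     names = list(points.keys())
--     (x1, y1), (x2, y2), (x3, y3) = points.values()
--     s = x1 * (y2 - y3) + x2 * (y3 - y1) + x3 * (y1 - y2)
--     if s > 0:
--         return names
--     if s < 0:
--         return [names[0], names[2], names[1]]
--     return []
-- ===== Notes on version B (the rewrite author's own statement) =====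
-- stated objective: simpler
-- what changed: Replaces the enumeration of all 6 permutations with one signed-area computation and a sign test (positive: keep order; negative: swap the last two vertices; zero: empty list).
import Mathlib
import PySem

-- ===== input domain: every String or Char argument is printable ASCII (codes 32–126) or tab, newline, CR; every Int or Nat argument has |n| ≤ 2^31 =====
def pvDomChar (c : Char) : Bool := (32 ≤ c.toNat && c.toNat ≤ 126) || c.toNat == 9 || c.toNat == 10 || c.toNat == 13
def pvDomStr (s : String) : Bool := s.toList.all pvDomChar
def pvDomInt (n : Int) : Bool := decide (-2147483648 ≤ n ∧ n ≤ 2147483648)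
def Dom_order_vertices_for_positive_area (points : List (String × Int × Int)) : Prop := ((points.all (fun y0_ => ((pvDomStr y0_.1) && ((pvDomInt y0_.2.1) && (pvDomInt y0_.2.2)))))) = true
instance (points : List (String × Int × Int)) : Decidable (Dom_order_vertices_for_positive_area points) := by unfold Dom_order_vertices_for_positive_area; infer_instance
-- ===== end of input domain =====

-- B replaces A's scan of all 6 permutations by one signed-area computation and a sign test
-- (equivalence proved on dicts with exactly 3 entries; A raises ValueError otherwise).

-- ===== PORT A =====
-- signed_area(p1, p2, p3) from A
def pvSignedArea (p1 p2 p3 : Int × Int) : Int :=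
  p1.1 * (p2.2 - p3.2) + p2.1 * (p3.2 - p1.2) + p3.1 * (p1.2 - p2.2)

-- the 'for perm in permutations(...)' loop: return names of the first perm with area > 0, else []
def pvPickPos : List ((String × Int × Int) × (String × Int × Int) × (String × Int × Int)) → List String
  | [] => []
  | (p, q, r) :: rest =>
    if pvSignedArea p.2 q.2 r.2 > 0 then [p.1, q.1, r.1] else pvPickPos rest

def order_vertices_for_positive_area (points : List (String × Int × Int)) : List String :=
  match points with
  | [a, b, c] =>
    -- itertools.permutations order on the 3 zipped (name, value) pairs
    pvPickPos [(a,b,c), (a,c,b), (b,a,c), (b,c,a), (c,a,b), (c,b,a)]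
  | _ => []  -- Python A raises ValueError here (outside Pre_)

-- ===== PORT B =====
def order_vertices_for_positive_area_alt (points : List (String × Int × Int)) : List String :=
  -- names = list(points.keys()); (x1,y1),(x2,y2),(x3,y3) = points.values()
  -- (the unpacking raises ValueError unless there are exactly 3 values: outside Pre_;
  --  totalized here with getD defaults, which Pre_ never reaches)
  let names := points.map Prod.fst
  let vals := points.map Prod.snd
  let p1 := vals.getD 0 (0, 0)
  let p2 := vals.getD 1 (0, 0)
  let p3 := vals.getD 2 (0, 0)
  let s := p1.1 * (p2.2 - p3.2) + p2.1 * (p3.2 - p1.2) + p3.1 * (p1.2 - p2.2)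
  if s > 0 then names
  else if s < 0 then [names.getD 0 "", names.getD 2 "", names.getD 1 ""]
  else []

-- ===== PRECONDITION & SPEC =====
-- A (and B) raise ValueError unless the dict has exactly 3 entries; as a dict the keys are distinct.
def Pre_order_vertices_for_positive_area (points : List (String × Int × Int)) : Prop :=
  points.length = 3 ∧ (points.map Prod.fst).Nodup
instance (points : List (String × Int × Int)) : Decidable (Pre_order_vertices_for_positive_area points) := by
  unfold Pre_order_vertices_for_positive_area; infer_instance
def pvWitness_order_vertices_for_positive_area : (List (String × Int × Int)) :=
  [("a", 0, 0), ("b", 1, 0), ("c", 0, 1)]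
def Spec_order_vertices_for_positive_area (points : List (String × Int × Int)) (out : List String) : Prop := out = order_vertices_for_positive_area_alt points
instance (points : List (String × Int × Int)) (out : List String) : Decidable (Spec_order_vertices_for_positive_area points out) := by unfold Spec_order_vertices_for_positive_area; infer_instance

-- ===== CLAIM (what is proved, stated in full; the proofs are below) =====
def Claim_equal_order_vertices_for_positive_area : Prop := ∀ (points : List (String × Int × Int)), Dom_order_vertices_for_positive_area points → Pre_order_vertices_for_positive_area points → Spec_order_vertices_for_positive_area points (order_vertices_for_positive_area points)

-- ===== LEMMAS AND PROOFS =====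

-- ===== VERDICT (by name: the statement is the Claim_ definition above) =====
theorem order_vertices_for_positive_area_spec : Claim_equal_order_vertices_for_positive_area := by
  intro points _ hPre
  obtain ⟨hlen, -⟩ := hPre
  match points, hlen with
  | [a, b, c], _ =>
    show order_vertices_for_positive_area [a,b,c] = order_vertices_for_positive_area_alt [a,b,c]
    obtain ⟨na, xa, ya⟩ := a; obtain ⟨nb, xb, yb⟩ := b; obtain ⟨nc, xc, yc⟩ := c
    simp only [order_vertices_for_positive_area, order_vertices_for_positive_area_alt,
      pvPickPos, pvSignedArea, List.map_cons, List.map_nil, List.getD, List.getElem?_cons_zero,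
      List.getElem?_cons_succ, Option.getD_some]
    split_ifs <;> first | rfl | (exfalso; nlinarith)
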